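-- pv_equiv track=rewrite | github.com/ashweej/Acadza-AI | Option formatting for jsonl file.py | convert_options
-- ===== SOURCE A (Python) =====
-- def convert_options(text: str) -> str:
--     """Convert options (1-4) and (a-d) into (A-D)."""
--     replacements = {
--         "(1)": "(A)", "(2)": "(B)", "(3)": "(C)", "(4)": "(D)",
--         "(a)": "(A)", "(b)": "(B)", "(c)": "(C)", "(d)": "(D)",
--         "(A)": "(A)", "(B)": "(B)", "(C)": "(C)", "(D)": "(D)",
--     }
--     for k, v in replacements.items():
--         text = text.replace(k, v)
--     return text
-- ===== SOURCE B (Python) =====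
-- def convert_options(text: str) -> str:
--     """Convert options (1-4) and (a-d) into (A-D)."""
--     mapping = {
--         "1": "A", "2": "B", "3": "C", "4": "D",
--         "a": "A", "b": "B", "c": "C", "d": "D",
--         "A": "A", "B": "B", "C": "C", "D": "D",
--     }
--     out = []
--     i = 0
--     n = len(text)
--     while i < n:
--         if text[i] == "(" and i + 2 < n and text[i + 1] in mapping and text[i + 2] == ")":
--             out.append("(" + mapping[text[i + 1]] + ")")
--             i += 3
--         else:
--             out.append(text[i])
--             i += 1
--     return "".join(out)
-- ===== Notes on version B (the rewrite author's own statement) =====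
-- stated objective: alternative
-- what changed: Replaces the 12 sequential full-text str.replace passes by one explicit left-to-right scan that, on seeing an opening parenthesis, a mapped character (a digit 1-4 or a letter a-d or A-D) and a closing parenthesis, emits the normalized uppercase label and otherwise copies the character verbatim.
import Mathlib
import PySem

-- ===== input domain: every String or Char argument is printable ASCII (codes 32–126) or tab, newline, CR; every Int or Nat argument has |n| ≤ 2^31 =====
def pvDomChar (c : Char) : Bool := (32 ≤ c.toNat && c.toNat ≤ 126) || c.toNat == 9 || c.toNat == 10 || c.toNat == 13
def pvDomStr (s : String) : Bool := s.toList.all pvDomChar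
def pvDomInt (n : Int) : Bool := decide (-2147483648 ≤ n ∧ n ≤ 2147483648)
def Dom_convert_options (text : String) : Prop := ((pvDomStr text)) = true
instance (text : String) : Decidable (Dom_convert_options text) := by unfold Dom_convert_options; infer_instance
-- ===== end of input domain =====

-- B replaces A's 12 sequential str.replace passes by one explicit left-to-right scan (alternative, same result).

-- ===== PORT A =====
-- the replacements dict of A, iterated in insertion order (all keys distinct)
def pvReplacements : List (String × String) :=
  [("(1)", "(A)"), ("(2)", "(B)"), ("(3)", "(C)"), ("(4)", "(D)"),
   ("(a)", "(A)"), ("(b)", "(B)"), ("(c)", "(C)"), ("(d)", "(D)"),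
   ("(A)", "(A)"), ("(B)", "(B)"), ("(C)", "(C)"), ("(D)", "(D)")]

def convert_options (text : String) : String :=
  List.foldl (fun t kv => PySem.Str.replace t kv.1 kv.2) text pvReplacements

-- ===== PORT B =====
-- B's mapping dict
def pvMapping : PySem.Dict Char Char :=
  PySem.Dict.ofList
    [('1', 'A'), ('2', 'B'), ('3', 'C'), ('4', 'D'),
     ('a', 'A'), ('b', 'B'), ('c', 'C'), ('d', 'D'),
     ('A', 'A'), ('B', 'B'), ('C', 'C'), ('D', 'D')]

-- B's while-loop: a left-to-right scan over the characters; the 'out' list is the emitted result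
def pvScan : List Char → List Char
  | c :: x :: e :: r =>
      if c = '(' && pvMapping.contains x && e = ')' then
        '(' :: pvMapping.getD x x :: ')' :: pvScan r
      else c :: pvScan (x :: e :: r)
  | c :: t => c :: pvScan t
  | [] => []

def convert_options_alt (text : String) : String :=
  String.ofList (pvScan text.toList)

-- ===== PRECONDITION & SPEC =====
def Spec_convert_options (text : String) (out : String) : Prop := out = convert_options_alt text
instance (text : String) (out : String) : Decidable (Spec_convert_options text out) := by unfold Spec_convert_options; infer_instance

-- ===== CLAIM (what is proved, stated in full; the proofs are below) =====
def Claim_equal_convert_options : Prop := ∀ (text : String), Dom_convert_options text → Spec_convert_options text (convert_options text)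

-- ===== LEMMAS AND PROOFS =====

-- list-level versions of the two sides
def pvStep (s : List Char) (p : List Char × List Char) : List Char :=
  PySem.Chars.replace s p.1 p.2

def pvPairsC : List (List Char × List Char) :=
  pvReplacements.map (fun kv => (kv.1.toList, kv.2.toList))

-- replace.go: the accumulator factors out
lemma pv_go_acc (old new : List Char) :
    ∀ fuel l acc, PySem.Chars.replace.go old new fuel l acc
      = acc.reverse ++ PySem.Chars.replace.go old new fuel l [] := by
  intro fuel
  induction fuel with
  | zero => intro l acc; simp [PySem.Chars.replace.go]
  | succ n ih =>
    intro l acc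
    cases l with
    | nil => simp [PySem.Chars.replace.go]
    | cons c t =>
      simp only [PySem.Chars.replace.go]
      by_cases h : old.isPrefixOf (c :: t) = true
      · simp only [h, if_pos]
        rw [ih _ (new.reverse ++ acc), ih _ (new.reverse ++ [])]
        simp
      · simp only [eq_false_of_ne_true h, if_neg, Bool.false_eq_true, not_false_iff]
        rw [ih _ (c :: acc), ih _ [c]]
        simp

-- replace.go: any fuel ≥ length gives the same value
lemma pv_go_fuel (old new : List Char) (hold : old ≠ []) :
    ∀ fuel l, l.length ≤ fuel →
      PySem.Chars.replace.go old new fuel l [] = PySem.Chars.replace.go old new l.length l [] := by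
  intro fuel
  induction fuel using Nat.strong_induction_on with
  | _ fuel ih =>
    intro l hl
    cases l with
    | nil => cases fuel <;> simp [PySem.Chars.replace.go]
    | cons c t =>
      cases fuel with
      | zero => simp at hl
      | succ n =>
        have hl' : t.length ≤ n := by simp only [List.length_cons] at hl; omega
        have hone : 1 ≤ old.length := by cases old <;> simp_all
        have hlen1 : (List.drop old.length (c :: t)).length ≤ t.length := by
          simp only [List.length_drop, List.length_cons]; omega
        have hlen2 : (List.drop old.length (c :: t)).length ≤ n := le_trans hlen1 hl'
        simp only [List.length_cons, PySem.Chars.replace.go]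
        by_cases h : old.isPrefixOf (c :: t) = true
        · simp only [h, if_pos]
          rw [pv_go_acc, pv_go_acc old new t.length]
          rw [ih n (by omega) _ hlen2, ih t.length (by omega) _ hlen1]
        · simp only [eq_false_of_ne_true h, if_neg, Bool.false_eq_true, not_false_iff]
          rw [pv_go_acc, pv_go_acc old new t.length]
          rw [ih n (by omega) t hl', ih t.length (by omega) t le_rfl]

lemma pv_replace_nil (old new : List Char) (hold : old ≠ []) :
    PySem.Chars.replace [] old new = [] := by
  simp [PySem.Chars.replace, List.isEmpty_eq_false_iff.mpr hold, PySem.Chars.replace.go]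

lemma pv_replace_cons (old new : List Char) (c : Char) (t : List Char)
    (hold : old ≠ []) (h : old.isPrefixOf (c :: t) = false) :
    PySem.Chars.replace (c :: t) old new = c :: PySem.Chars.replace t old new := by
  simp only [PySem.Chars.replace, List.isEmpty_eq_false_iff.mpr hold, if_neg, Bool.false_eq_true,
    not_false_iff, List.length_cons]
  simp only [PySem.Chars.replace.go, h, Bool.false_eq_true, if_neg, not_false_iff]
  rw [pv_go_acc]
  simp

lemma pv_replace_prefix (old new : List Char) (l : List Char)
    (hold : old ≠ []) (h : old.isPrefixOf l = true) :
    PySem.Chars.replace l old new = new ++ PySem.Chars.replace (l.drop old.length) old new := by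
  cases l with
  | nil => cases old with
    | nil => exact absurd rfl hold
    | cons a o => simp [List.isPrefixOf] at h
  | cons c t =>
    simp only [PySem.Chars.replace, List.isEmpty_eq_false_iff.mpr hold, if_neg, Bool.false_eq_true,
      not_false_iff, List.length_cons]
    simp only [PySem.Chars.replace.go, h, if_pos]
    rw [pv_go_acc]
    have hlen : (List.drop old.length (c :: t)).length ≤ t.length := by
      have : 1 ≤ old.length := by cases old <;> simp_all
      simp only [List.length_drop, List.length_cons]; omega
    rw [pv_go_fuel old new hold t.length _ hlen]
    simp

-- replace never changes the first character when old and new start with the same character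
lemma pv_replace_head? (k : Char) (o' n' : List Char) (l : List Char) :
    (PySem.Chars.replace l (k :: o') (k :: n')).head? = l.head? := by
  cases l with
  | nil => rw [pv_replace_nil _ _ (by simp)]
  | cons c t =>
    by_cases h : (k :: o').isPrefixOf (c :: t) = true
    · rw [pv_replace_prefix _ _ _ (by simp) h]
      have hk : c = k := by simp [List.isPrefixOf] at h; exact h.1.symm
      simp [hk]
    · rw [pv_replace_cons _ _ _ _ (by simp) (eq_false_of_ne_true h)]
      simp

-- the shape every pair of A's replacement table has
def pvGoodPair (p : List Char × List Char) : Prop :=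
  ∃ k v, p.1 = ['(', k, ')'] ∧ p.2 = ['(', v, ')'] ∧ pvMapping.contains k = true ∧ v ≠ '('

lemma pv_pairs_good : ∀ p ∈ pvPairsC, pvGoodPair p := by
  intro p hp
  simp only [pvPairsC, pvReplacements, List.map, List.mem_cons, List.not_mem_nil, or_false] at hp
  rcases hp with rfl|rfl|rfl|rfl|rfl|rfl|rfl|rfl|rfl|rfl|rfl|rfl <;>
    exact ⟨_, _, rfl, rfl, by decide, by decide⟩

-- a match of A's table at the head of the string
def pvHeadMatch : List Char → Bool
  | c :: x :: e :: _ => c = '(' && pvMapping.contains x && e = ')'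
  | _ => false

lemma pv_contains_lparen : pvMapping.contains '(' = false := by decide
lemma pv_contains_ne_lparen {x : Char} (h : pvMapping.contains x = true) : x ≠ '(' := by
  intro hx; rw [hx] at h; exact absurd h (by decide)

-- one replace pass over a non-matching head: it peels the head and keeps the head non-matching
lemma pv_step_nomatch (p : List Char × List Char) (hp : pvGoodPair p)
    (c : Char) (t : List Char) (h : pvHeadMatch (c :: t) = false) :
    PySem.Chars.replace (c :: t) p.1 p.2 = c :: PySem.Chars.replace t p.1 p.2 ∧
      pvHeadMatch (c :: PySem.Chars.replace t p.1 p.2) = false := by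
  obtain ⟨k, v, hk, hv, hkc, hvne⟩ := hp
  have hknotp : p.1.isPrefixOf (c :: t) = false := by
    cases hval : p.1.isPrefixOf (c :: t) with
    | false => rfl
    | true =>
      exfalso
      rw [hk] at hval
      cases t with
      | nil => simp [List.isPrefixOf] at hval
      | cons x u =>
        cases u with
        | nil => simp [List.isPrefixOf] at hval
        | cons e r =>
          obtain ⟨hc, hx, he⟩ : '(' = c ∧ k = x ∧ ')' = e := by
            simpa [List.isPrefixOf] using hval
          subst hc hx he
          simp [pvHeadMatch, hkc] at h
  refine ⟨pv_replace_cons _ _ _ _ (by rw [hk]; simp) hknotp, ?_⟩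
  cases t with
  | nil =>
    rw [pv_replace_nil _ _ (by rw [hk]; simp)]
    simp [pvHeadMatch]
  | cons x u =>
    by_cases hpre : p.1.isPrefixOf (x :: u) = true
    · rw [pv_replace_prefix _ _ _ (by rw [hk]; simp) hpre, hv]
      simp [pvHeadMatch, pv_contains_lparen]
    · rw [pv_replace_cons _ _ _ _ (by rw [hk]; simp) (eq_false_of_ne_true hpre)]
      cases u with
      | nil =>
        rw [pv_replace_nil _ _ (by rw [hk]; simp)]
        simp [pvHeadMatch]
      | cons e r =>
        have hhead : (PySem.Chars.replace (e :: r) p.1 p.2).head? = some e := by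
          rw [hk, hv]; exact pv_replace_head? '(' [k, ')'] [v, ')'] (e :: r)
        cases hrep : PySem.Chars.replace (e :: r) p.1 p.2 with
        | nil => simp [hrep] at hhead
        | cons w ws =>
          rw [hrep] at hhead
          simp only [List.head?_cons, Option.some.injEq] at hhead
          subst hhead
          simpa [pvHeadMatch] using h

-- the whole cascade over a non-matching head
lemma pv_fold_nomatch : ∀ (ps : List (List Char × List Char)), (∀ p ∈ ps, pvGoodPair p) →
    ∀ c t, pvHeadMatch (c :: t) = false →
      List.foldl pvStep (c :: t) ps = c :: List.foldl pvStep t ps := by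
  intro ps
  induction ps with
  | nil => intro _ c t _; rfl
  | cons p ps ih =>
    intro hgood c t h
    obtain ⟨h1, h2⟩ := pv_step_nomatch p (hgood p (by simp)) c t h
    simp only [List.foldl_cons]
    rw [show pvStep (c :: t) p = c :: PySem.Chars.replace t p.1 p.2 from h1]
    exact ih (fun q hq => hgood q (by simp [hq])) c _ h2

lemma pv_fold_nil : ∀ (ps : List (List Char × List Char)), (∀ p ∈ ps, pvGoodPair p) →
    List.foldl pvStep [] ps = [] := by
  intro ps
  induction ps with
  | nil => intro _; rfl
  | cons p ps ih =>
    intro hgood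
    obtain ⟨k, v, hk, _, _, _⟩ := hgood p (by simp)
    simp only [List.foldl_cons]
    rw [show pvStep [] p = [] from pv_replace_nil _ _ (by rw [hk]; simp)]
    exact ih (fun q hq => hgood q (by simp [hq]))

-- one replace pass over a matched triple "(y)": fires iff the key char is y
lemma pv_rep_fire (y v : Char) (r : List Char) :
    PySem.Chars.replace ('(' :: y :: ')' :: r) ['(', y, ')'] ['(', v, ')']
      = '(' :: v :: ')' :: PySem.Chars.replace r ['(', y, ')'] ['(', v, ')'] := by
  rw [pv_replace_prefix _ _ _ (by simp) (by simp [List.isPrefixOf])]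
  simp

lemma pv_rep_skip3 (y k v : Char) (hy : y ≠ '(') (hk : k ≠ y) (r : List Char) :
    PySem.Chars.replace ('(' :: y :: ')' :: r) ['(', k, ')'] ['(', v, ')']
      = '(' :: y :: ')' :: PySem.Chars.replace r ['(', k, ')'] ['(', v, ')'] := by
  rw [pv_replace_cons _ _ _ _ (by simp) (by simp [List.isPrefixOf, hk]),
      pv_replace_cons _ _ _ _ (by simp) (by simp [List.isPrefixOf, Ne.symm hy]),
      pv_replace_cons _ _ _ _ (by simp) (by simp [List.isPrefixOf])]

-- the character a matched triple's middle ends up as, after the cascade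
def pvChain (ps : List (List Char × List Char)) (y : Char) : Char :=
  List.foldl (fun y p => if p.1 = ['(', y, ')'] then p.2.getD 1 y else y) y ps

-- the whole cascade over a matched triple
lemma pv_fold_match : ∀ (ps : List (List Char × List Char)), (∀ p ∈ ps, pvGoodPair p) →
    ∀ y r, y ≠ '(' →
      List.foldl pvStep ('(' :: y :: ')' :: r) ps
        = '(' :: pvChain ps y :: ')' :: List.foldl pvStep r ps := by
  intro ps
  induction ps with
  | nil => intro _ y r _; rfl
  | cons p ps ih =>
    intro hgood y r hy
    obtain ⟨k, v, hk, hv, _, hvne⟩ := hgood p (by simp)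
    simp only [List.foldl_cons, pvChain]
    by_cases hky : k = y
    · subst hky
      rw [show pvStep ('(' :: k :: ')' :: r) p
            = '(' :: v :: ')' :: PySem.Chars.replace r p.1 p.2 by
            simp only [pvStep, hk, hv]; exact pv_rep_fire k v r]
      rw [ih (fun q hq => hgood q (by simp [hq])) v _ hvne]
      simp [pvChain, pvStep, hk, hv]
    · rw [show pvStep ('(' :: y :: ')' :: r) p
            = '(' :: y :: ')' :: PySem.Chars.replace r p.1 p.2 by
            simp only [pvStep, hk, hv]; exact pv_rep_skip3 y k v hy hky r]
      rw [ih (fun q hq => hgood q (by simp [hq])) y _ hy]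
      have : ¬ p.1 = ['(', y, ')'] := by rw [hk]; simp [hky]
      simp [pvChain, pvStep, this]

-- the list-level cascade equals B's single scan
lemma pv_fold_eq_scan : ∀ l : List Char, List.foldl pvStep l pvPairsC = pvScan l := by
  intro l
  induction l using pvScan.induct with
  | case1 c x e r hcond ih =>
    obtain ⟨⟨hc, hx⟩, he⟩ : (c = '(' ∧ pvMapping.contains x = true) ∧ e = ')' := by
      simpa using hcond
    subst hc he
    rw [pv_fold_match pvPairsC pv_pairs_good x r (pv_contains_ne_lparen hx), ih]
    have hitems : pvMapping.items =
        [('1', 'A'), ('2', 'B'), ('3', 'C'), ('4', 'D'), ('a', 'A'), ('b', 'B'), ('c', 'C'),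
         ('d', 'D'), ('A', 'A'), ('B', 'B'), ('C', 'C'), ('D', 'D')] := by decide
    have hx' : '1' = x ∨ '2' = x ∨ '3' = x ∨ '4' = x ∨ 'a' = x ∨ 'b' = x ∨ 'c' = x ∨ 'd' = x ∨
        'A' = x ∨ 'B' = x ∨ 'C' = x ∨ 'D' = x := by
      have hx2 := hx
      rw [PySem.Dict.contains, hitems] at hx2
      simpa using hx2
    rw [pvScan]
    rcases hx' with rfl|rfl|rfl|rfl|rfl|rfl|rfl|rfl|rfl|rfl|rfl|rfl <;> rfl
  | case2 c x e r hcond ih =>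
    rw [pv_fold_nomatch pvPairsC pv_pairs_good c (x :: e :: r)
          (by simpa [pvHeadMatch] using hcond), ih]
    rw [pvScan]
    simp [hcond]
  | case3 c t hshape ih =>
    have hm : pvHeadMatch (c :: t) = false := by
      cases t with
      | nil => rfl
      | cons x u =>
        cases u with
        | nil => rfl
        | cons e r => exact (hshape x e r rfl).elim
    rw [pv_fold_nomatch pvPairsC pv_pairs_good c t hm, ih]
    cases t with
    | nil => rfl
    | cons x u =>
      cases u with
      | nil => rfl
      | cons e r => exact (hshape x e r rfl).elim
  | case4 => exact pv_fold_nil pvPairsC pv_pairs_good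

-- the string-level cascade computes the list-level cascade
lemma pv_toList_fold : ∀ (ps : List (String × String)) (s : String),
    (List.foldl (fun t kv => PySem.Str.replace t kv.1 kv.2) s ps).toList
      = List.foldl pvStep s.toList (ps.map (fun kv => (kv.1.toList, kv.2.toList))) := by
  intro ps
  induction ps with
  | nil => intro s; rfl
  | cons p ps ih =>
    intro s
    simp only [List.foldl_cons, List.map_cons, ih, pvStep, PySem.Str.toList_replace]

-- ===== VERDICT (by name: the statement is the Claim_ definition above) =====
theorem convert_options_spec : Claim_equal_convert_options := by
  intro text _
  show convert_options text = convert_options_alt text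
  have h : (convert_options text).toList = pvScan text.toList := by
    rw [convert_options, pv_toList_fold, ← pvPairsC, pv_fold_eq_scan]
  calc convert_options text = String.ofList (convert_options text).toList :=
        String.ofList_toList.symm
    _ = convert_options_alt text := by rw [h]; rfl
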